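-- pv_equiv track=rewrite | github.com/aurao22/ara_commons | ara_nlp_function.py | words_by_weight
-- ===== SOURCE A (Python) =====
-- def words_by_weight(words_dic):
--     res_dic = {}
--     count_keys = sorted(words_dic.values(), reverse=True)
--     for k in count_keys:
--         res_dic[k] = []
--
--     for key, v in words_dic.items():
--         res_dic[v].append(key)
--
--     return res_dic
-- ===== SOURCE B (Python) =====
-- def words_by_weight(words_dic):
--     # Sort the (word, count) items once by count descending (stable, so word
--     # order within a count is preserved), then split the sorted list into
--     # maximal runs of equal count, emitting one dict entry per run.
--     ordered = sorted(words_dic.items(), key=lambda kv: kv[1], reverse=True)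
--     res = {}
--     i = 0
--     while i < len(ordered):
--         count = ordered[i][1]
--         j = i
--         while j < len(ordered) and ordered[j][1] == count:
--             j += 1
--         res[count] = [w for w, _ in ordered[i:j]]
--         i = j
--     return res
-- ===== Notes on version B (the rewrite author's own statement) =====
-- stated objective: alternative
-- what changed: B sorts the (word, count) items once by count descending (a stable sort, preserving word order within a count) and then splits the sorted list into maximal equal-count runs, instead of A's sorting all values to seed empty lists in a dict and filling them in a second pass over the items.
import Mathlib
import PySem

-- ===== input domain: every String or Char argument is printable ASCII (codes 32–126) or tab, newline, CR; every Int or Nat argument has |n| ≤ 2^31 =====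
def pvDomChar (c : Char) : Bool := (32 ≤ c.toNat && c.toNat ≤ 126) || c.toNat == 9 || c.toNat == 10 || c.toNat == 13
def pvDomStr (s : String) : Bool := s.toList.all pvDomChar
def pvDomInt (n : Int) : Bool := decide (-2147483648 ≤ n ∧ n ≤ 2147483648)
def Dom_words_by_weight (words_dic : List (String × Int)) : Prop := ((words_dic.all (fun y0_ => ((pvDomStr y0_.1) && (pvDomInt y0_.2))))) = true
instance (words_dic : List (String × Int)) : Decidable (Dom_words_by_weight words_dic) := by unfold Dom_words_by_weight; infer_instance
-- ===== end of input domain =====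

-- B sorts the items once by count descending (stable) and splits the sorted list into maximal
-- equal-count runs, instead of A's seed-empty-lists-then-fill dict passes; objective: alternative.

-- ===== PORT A =====
-- res_dic[v].append(key) is ported as Dict.modify v [] (· ++ [key]); this is exact here because the
-- seeding loop has inserted every value occurring in words_dic, so the KeyError branch is unreachable.
def words_by_weight (words_dic : List (String × Int)) : List (Int × List String) :=
  let count_keys := PySem.List.sorted (words_dic.map (fun p => p.2)) (fun x => x) true
  let res_dic := count_keys.foldl (fun d k => d.insert k ([] : List String)) PySem.Dict.empty
  let res_dic := words_dic.foldl (fun d p => d.modify p.2 [] (fun l => l ++ [p.1])) res_dic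
  res_dic.items

-- ===== PORT B =====
-- the outer while loop walks the remaining suffix of the sorted list: recursion on the suffix;
-- the inner while loop computing the maximal equal-count run is the takeWhile/dropWhile split
def wbwRuns : List (String × Int) → List (Int × List String)
  | [] => []
  | p :: rest =>
    (p.2, (p :: rest.takeWhile (fun q => q.2 == p.2)).map (fun q => q.1)) ::
      wbwRuns (rest.dropWhile (fun q => q.2 == p.2))
termination_by items => items.length
decreasing_by
  simpa using Nat.lt_succ_of_le (List.length_dropWhile_le _ _)

def words_by_weight_alt (words_dic : List (String × Int)) : List (Int × List String) :=
  let ordered := PySem.List.sorted words_dic (fun kv => kv.2) true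
  (PySem.Dict.ofList (wbwRuns ordered)).items

-- ===== PRECONDITION & SPEC =====
def Spec_words_by_weight (words_dic : List (String × Int)) (out : List (Int × List String)) : Prop := out = words_by_weight_alt words_dic
instance (words_dic : List (String × Int)) (out : List (Int × List String)) : Decidable (Spec_words_by_weight words_dic out) := by unfold Spec_words_by_weight; infer_instance

-- ===== CLAIM (what is proved, stated in full; the proofs are below) =====
def Claim_equal_words_by_weight : Prop := ∀ (words_dic : List (String × Int)), Dom_words_by_weight words_dic → Spec_words_by_weight words_dic (words_by_weight words_dic)

-- ===== LEMMAS AND PROOFS =====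

-- A's seeding loop leaves [] at every key.
lemma seed_getD (L : List Int) (d : PySem.Dict Int (List String))
    (h : ∀ c, d.getD c ([] : List String) = []) (c : Int) :
    (L.foldl (fun d k => d.insert k ([] : List String)) d).getD c [] = [] := by
  induction L generalizing d with
  | nil => exact h c
  | cons k L ih =>
    refine ih _ (fun c' => ?_)
    by_cases hk : c' = k
    · subst hk; exact PySem.Dict.getD_insert_self _ _ _ _
    · rw [PySem.Dict.getD_insert_of_ne _ _ _ hk]; exact h c'

-- A's filling loop appends, per key, the words with that count in order.
lemma fillA_getD (ws : List (String × Int)) (d : PySem.Dict Int (List String)) (c : Int) :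
    (ws.foldl (fun d p => d.modify p.2 [] (fun l => l ++ [p.1])) d).getD c []
      = d.getD c [] ++ (ws.filter (fun p => p.2 == c)).map (fun p => p.1) := by
  have h := PySem.Dict.getD_foldl_modify_append (ws.map (fun p => (p.2, p.1))) d c
  simpa [List.foldl_map, List.filter_map, Function.comp] using h

-- Updating a set with elements it already contains is a no-op.
lemma update_of_subset {α : Type} [BEq α] [LawfulBEq α] (s : PySem.Set α) (xs : List α)
    (h : ∀ y ∈ xs, y ∈ s) : PySem.Set.update s xs = s := by
  rw [PySem.Set.update_eq_append_filter]
  simpa using h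

-- Inserting into a descending list goes after all elements with the same key: per-key filter is stable.
lemma filter_insertBy (c : Int) (x : String × Int) (ys : List (String × Int))
    (hys : ys.Pairwise (fun a b => b.2 ≤ a.2)) :
    (PySem.List.insertBy (fun a b => decide (b.2 < a.2)) x ys).filter (fun q => q.2 == c)
      = ys.filter (fun q => q.2 == c) ++ (if x.2 == c then [x] else []) := by
  induction ys with
  | nil => by_cases hx : x.2 = c <;> simp [PySem.List.insertBy, hx]
  | cons y ys ih =>
    rw [List.pairwise_cons] at hys
    simp only [PySem.List.insertBy]
    by_cases hlt : y.2 < x.2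
    · rw [if_pos (by simpa using hlt)]
      by_cases hx : x.2 = c
      · have hnone : (y :: ys).filter (fun q => q.2 == c) = [] := by
          rw [List.filter_eq_nil_iff]
          intro q hq
          have hqle : q.2 ≤ y.2 := by
            rcases List.mem_cons.1 hq with rfl | hq'
            · exact le_refl _
            · exact hys.1 q hq'
          simp only [beq_iff_eq]
          omega
        simp [hnone, hx]
      · simp [List.filter_cons, hx]
    · rw [if_neg (by simpa using hlt)]
      rw [List.filter_cons, List.filter_cons, ih hys.2]
      by_cases hy : y.2 = c <;> simp [hy]

-- Stability of Python's sort: per-key filter of the descending sort is the filter of the input.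
lemma filter_sorted_rev (c : Int) (ws : List (String × Int)) :
    (PySem.List.sorted ws (fun kv => kv.2) true).filter (fun q => q.2 == c)
      = ws.filter (fun q => q.2 == c) := by
  induction ws using List.reverseRecOn with
  | nil => rfl
  | append_singleton ws x ih =>
    have hfold := PySem.List.sorted_rev_eq_foldl_insertBy (ws ++ [x]) (fun kv : String × Int => kv.2)
    rw [List.foldl_append, ← PySem.List.sorted_rev_eq_foldl_insertBy ws (fun kv : String × Int => kv.2)] at hfold
    rw [hfold, List.foldl_cons, List.foldl_nil,
        filter_insertBy c x _ (PySem.List.sorted_pairwise_rev ws _), ih,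
        List.filter_append]
    by_cases hx : x.2 = c <;> simp [hx]

-- The counts of the sorted items, read off in order, are the sorted counts.
lemma map_snd_sorted (ws : List (String × Int)) :
    (PySem.List.sorted ws (fun kv => kv.2) true).map (fun q => q.2)
      = PySem.List.sorted (ws.map (fun p => p.2)) (fun x => x) true := by
  refine List.Perm.eq_of_pairwise (fun a b _ _ h1 h2 => le_antisymm h2 h1) ?_ ?_ ?_
  · exact (List.pairwise_map).2 (PySem.List.sorted_pairwise_rev ws _)
  · exact PySem.List.sorted_pairwise_rev _ _
  · exact ((PySem.List.sorted_perm ws _ _).map _).trans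
      (PySem.List.sorted_perm (ws.map (fun p => p.2)) _ _).symm

-- discard drops a leading block of copies of a and nothing else when the rest avoids a.
lemma discard_ofList_append (a : Int) (us vs : List Int) (hu : ∀ u ∈ us, u = a) :
    PySem.Set.discard (PySem.Set.ofList (us ++ vs)) a = PySem.Set.discard (PySem.Set.ofList vs) a := by
  induction us with
  | nil => rfl
  | cons u us ih =>
    have ha : u = a := hu u (List.mem_cons_self)
    subst ha
    rw [List.cons_append, PySem.Set.ofList_cons]
    show List.filter _ _ = _
    rw [List.filter_cons]
    simp only [PySem.Set.discard, List.filter_filter]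
    simpa [PySem.Set.discard] using ih (fun u hm => hu u (List.mem_cons_of_mem _ hm))

lemma discard_of_not_mem (a : Int) (vs : List Int) (hv : ∀ v ∈ vs, v ≠ a) :
    PySem.Set.discard (PySem.Set.ofList vs) a = PySem.Set.ofList vs := by
  rw [PySem.Set.discard, List.filter_eq_self]
  intro v hm
  have := hv v ((PySem.Set.mem_ofList vs v).1 hm)
  simpa using this

-- Run splitting of a descending list yields one entry per distinct count, in first-occurrence
-- (= descending) order, carrying exactly the words with that count in order.
lemma wbwRuns_eq (L : List (String × Int)) (h : L.Pairwise (fun a b => b.2 ≤ a.2)) :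
    wbwRuns L = (PySem.Set.ofList (L.map (fun q => q.2))).map
      (fun c => (c, (L.filter (fun q => q.2 == c)).map (fun q => q.1))) := by
  induction L using wbwRuns.induct with
  | case1 => simp [wbwRuns]
  | case2 p rest ih =>
    set t := rest.takeWhile (fun q => q.2 == p.2) with ht
    set d := rest.dropWhile (fun q => q.2 == p.2) with hd
    have hrest : t ++ d = rest := List.takeWhile_append_dropWhile
    rw [List.pairwise_cons] at h
    have htmem : ∀ q ∈ t, q.2 = p.2 := fun q hq => by
      simpa using List.mem_takeWhile_imp hq
    have hdlt : ∀ q ∈ d, q.2 < p.2 := by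
      intro q hq
      have hle : q.2 ≤ p.2 := h.1 q (by rw [← hrest]; exact List.mem_append_right _ hq)
      have hdpair : d.Pairwise (fun a b => b.2 ≤ a.2) :=
        h.2.sublist (List.dropWhile_sublist _)
      cases hdd : d with
      | nil => rw [hdd] at hq; cases hq
      | cons q0 d' =>
        have hq0 : q0.2 ≠ p.2 := by
          have := List.head?_dropWhile_not (fun q : String × Int => q.2 == p.2) rest
          rw [← hd, hdd] at this
          simpa using this
        have hq0le : q0.2 ≤ p.2 := h.1 q0 (by
          rw [← hrest, hdd]; exact List.mem_append_right _ List.mem_cons_self)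
        rw [hdd] at hq
        rcases List.mem_cons.1 hq with rfl | hq
        · omega
        · have : q.2 ≤ q0.2 := by
            rw [hdd] at hdpair
            exact (List.pairwise_cons.1 hdpair).1 q hq
          omega
    -- keys
    have hmap : (p :: rest).map (fun q => q.2)
        = (p.2 :: t.map (fun q => q.2)) ++ d.map (fun q => q.2) := by
      rw [List.map_cons, ← hrest, List.map_append]; rfl
    have hkeys : PySem.Set.ofList ((p :: rest).map (fun q => q.2))
        = p.2 :: PySem.Set.ofList (d.map (fun q => q.2)) := by
      rw [hmap, List.cons_append, PySem.Set.ofList_cons,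
          discard_ofList_append p.2 _ _ (by
            intro u hu
            rcases List.mem_map.1 hu with ⟨q, hq, rfl⟩
            exact htmem q hq),
          discard_of_not_mem p.2 _ (by
            intro v hv
            rcases List.mem_map.1 hv with ⟨q, hq, rfl⟩
            exact ne_of_lt (hdlt q hq))]
    -- the head run
    have hheadfilter : (p :: rest).filter (fun q => q.2 == p.2) = p :: t := by
      rw [List.filter_cons_of_pos (by simp), ← hrest, List.filter_append]
      rw [List.filter_eq_self.2 (fun q hq => by simp [htmem q hq]),
          List.filter_eq_nil_iff.2 (fun q hq => by simp [ne_of_lt (hdlt q hq)])]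
      simp
    -- tail runs: filters at smaller counts ignore p and t
    have htailfilter : ∀ c ∈ PySem.Set.ofList (d.map (fun q => q.2)),
        (p :: rest).filter (fun q => q.2 == c) = d.filter (fun q => q.2 == c) := by
      intro c hc
      rcases List.mem_map.1 ((PySem.Set.mem_ofList _ c).1 hc) with ⟨q0, hq0, rfl⟩
      have hcp : q0.2 ≠ p.2 := ne_of_lt (hdlt q0 hq0)
      rw [List.filter_cons_of_neg (by simpa using fun e => hcp e.symm), ← hrest,
          List.filter_append, List.filter_eq_nil_iff.2 (fun q hq => by
            have := htmem q hq
            simp only [beq_iff_eq]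
            omega)]
      simp
    rw [wbwRuns, hkeys, List.map_cons]
    congr 1
    · simp [hheadfilter, ht]
    · rw [ih (h.2.sublist (List.dropWhile_sublist _))]
      exact (List.map_congr_left (fun c hc => by rw [htailfilter c hc])).symm

-- items of a dict built from pairs with distinct keys are those pairs.
lemma items_ofList_nodup (ps : List (Int × List String)) (h : (ps.map Prod.fst).Nodup) :
    (PySem.Dict.ofList ps).items = ps := by
  have := PySem.Dict.items_foldl_insert_fresh ps Prod.fst Prod.snd PySem.Dict.empty
    (fun a _ => PySem.Dict.contains_empty _) h
  simpa [PySem.Dict.ofList, PySem.Dict.update] using this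

theorem words_by_weight_spec_aux (ws : List (String × Int)) :
    words_by_weight ws = words_by_weight_alt ws := by
  unfold words_by_weight words_by_weight_alt
  set vals := ws.map (fun p => p.2) with hvals
  set ck := PySem.List.sorted vals (fun x => x) true with hck
  set seed := ck.foldl (fun d k => d.insert k ([] : List String)) PySem.Dict.empty with hseed
  set fill := ws.foldl (fun d p => d.modify p.2 [] (fun l => l ++ [p.1])) seed with hfill
  set L := PySem.List.sorted ws (fun kv => kv.2) true with hL
  -- A's keys
  have hseedkeys : seed.keys = PySem.Set.ofList ck := by
    rw [hseed, PySem.Dict.keys_foldl_insert ck (fun _ _ => ([] : List String)),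
        PySem.Dict.keys_empty, PySem.Set.update_nil_left]
  have hsub : ∀ y ∈ vals, y ∈ seed.keys := by
    intro y hy
    rw [hseedkeys, PySem.Set.mem_ofList, hck, PySem.List.mem_sorted]
    exact hy
  have hfillkeys : fill.keys = PySem.Set.ofList ck := by
    rw [hfill, PySem.Dict.keys_foldl_modify_key ws (fun p => p.2) [] (fun _ p l => l ++ [p.1]),
        ← hvals, update_of_subset _ _ hsub, hseedkeys]
  have hval : ∀ c, fill.getD c [] = (ws.filter (fun p => p.2 == c)).map (fun p => p.1) := by
    intro c
    rw [hfill, fillA_getD, seed_getD ck _ (fun c' => PySem.Dict.getD_empty c' []),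
        List.nil_append]
  have hnd : fill.keys.Nodup := by rw [hfillkeys]; exact PySem.Set.nodup_ofList ck
  -- A's result
  rw [PySem.Dict.items_eq_map_keys fill hnd [], hfillkeys]
  -- B's result
  have hruns : wbwRuns L = (PySem.Set.ofList ck).map
      (fun c => (c, (ws.filter (fun q => q.2 == c)).map (fun q => q.1))) := by
    rw [wbwRuns_eq L (PySem.List.sorted_pairwise_rev ws _), hL, map_snd_sorted, ← hvals, ← hck]
    exact List.map_congr_left (fun c _ => by rw [filter_sorted_rev])
  show _ = (PySem.Dict.ofList (wbwRuns L)).items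
  rw [hruns, items_ofList_nodup _ (by
    rw [List.map_map]
    exact (PySem.Set.nodup_ofList ck).map_on (fun a _ b _ => by simp))]
  exact List.map_congr_left (fun c _ => by rw [hval c])

-- ===== VERDICT (by name: the statement is the Claim_ definition above) =====
theorem words_by_weight_spec : Claim_equal_words_by_weight := by
  intro ws _
  exact words_by_weight_spec_aux ws
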